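-- pv_equiv track=rewrite | github.com/proteanstudios/aitherhub | worker/batch/split_video_async.py | _parse_account_from_conn_str
-- ===== SOURCE A (Python) =====
-- def _parse_account_from_conn_str(conn_str: str) -> dict:
--     parts = conn_str.split(";")
--     out = {"AccountName": None, "AccountKey": None}
--     for p in parts:
--         if p.startswith("AccountName="):
--             out["AccountName"] = p.split("=", 1)[1]
--         if p.startswith("AccountKey="):
--             out["AccountKey"] = p.split("=", 1)[1]
--     return out
-- ===== SOURCE B (Python) =====
-- def _parse_account_from_conn_str(conn_str: str) -> dict:
--     d = {}
--     for p in conn_str.split(";"):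
--         if "=" in p:
--             i = p.find("=")
--             d[p[:i]] = p[i + 1:]
--     return {"AccountName": d.get("AccountName"), "AccountKey": d.get("AccountKey")}
-- ===== Notes on version B (the rewrite author's own statement) =====
-- stated objective: idiomatic
-- what changed: B builds one generic key-to-value dict from every segment containing an equals sign (splitting each part at its first equals sign) and then looks the two account fields up in it, instead of A's per-part scan that tests two hard-coded prefixes and mutates a two-key dict in place.
import Mathlib
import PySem

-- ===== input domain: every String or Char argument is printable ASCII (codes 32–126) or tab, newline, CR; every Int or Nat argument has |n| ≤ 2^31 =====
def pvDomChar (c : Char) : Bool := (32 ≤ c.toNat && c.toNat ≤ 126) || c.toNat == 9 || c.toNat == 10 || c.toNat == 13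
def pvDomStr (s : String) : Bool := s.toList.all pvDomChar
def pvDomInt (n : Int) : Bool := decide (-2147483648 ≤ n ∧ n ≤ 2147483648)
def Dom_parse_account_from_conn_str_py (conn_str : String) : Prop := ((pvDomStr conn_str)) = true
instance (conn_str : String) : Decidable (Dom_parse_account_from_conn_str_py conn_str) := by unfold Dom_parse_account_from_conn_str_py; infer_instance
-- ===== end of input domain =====

-- B builds the complete key->value table from every "k=v" segment in one generic pass and
-- then looks the two account fields up, instead of A's per-part scan for two hard-coded prefixes.
-- ===== PORT A =====
-- A: scan each ';'-part for the two prefixes, mutating a two-key dict in place.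
def parse_account_from_conn_str_py (conn_str : String) : List (String × Option String) :=
  let parts := (PySem.Str.split? conn_str ";").getD []
  let out0 : PySem.Dict String (Option String) :=
    PySem.Dict.ofList [("AccountName", none), ("AccountKey", none)]
  let out := parts.foldl (fun out p =>
    let out := if PySem.Str.startswith p "AccountName=" then
        out.insert "AccountName" (PySem.List.pyGet? ((PySem.Str.splitMax? p "=" 1).getD []) 1)
      else out
    if PySem.Str.startswith p "AccountKey=" then
      out.insert "AccountKey" (PySem.List.pyGet? ((PySem.Str.splitMax? p "=" 1).getD []) 1)
    else out) out0
  out.items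

-- ===== PORT B =====
-- B (idiomatic): build the full key->value table from every 'k=v' part, then look the two names up.
def parse_account_from_conn_str_py_alt (conn_str : String) : List (String × Option String) :=
  let parts := (PySem.Str.split? conn_str ";").getD []
  let d : PySem.Dict String String := parts.foldl (fun d p =>
    if PySem.Str.isIn "=" p then
      let i := PySem.Str.find p "="
      d.insert (PySem.Str.slice p none (some i)) (PySem.Str.slice p (some (i + 1)) none)
    else d) PySem.Dict.empty
  [("AccountName", d.get? "AccountName"), ("AccountKey", d.get? "AccountKey")]

-- ===== PRECONDITION & SPEC =====
def Spec_parse_account_from_conn_str_py (conn_str : String) (out : List (String × Option String)) : Prop := out = parse_account_from_conn_str_py_alt conn_str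
instance (conn_str : String) (out : List (String × Option String)) : Decidable (Spec_parse_account_from_conn_str_py conn_str out) := by unfold Spec_parse_account_from_conn_str_py; infer_instance

-- ===== CLAIM (what is proved, stated in full; the proofs are below) =====
def Claim_equal_parse_account_from_conn_str_py : Prop := ∀ (conn_str : String), Dom_parse_account_from_conn_str_py conn_str → Spec_parse_account_from_conn_str_py conn_str (parse_account_from_conn_str_py conn_str)

-- ===== LEMMAS AND PROOFS =====

def pvNE (c : Char) : Bool := c != '='

lemma pvNE_eq : pvNE '=' = false := rfl
lemma pvNE_ne {c : Char} (h : ¬ c = '=') : pvNE c = true := by simp [pvNE, h]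

lemma find_go_eq (pl : List Char) : ∀ (k : Nat), PySem.Chars.find.go ['='] pl k =
    (if '=' ∈ pl then ((k + (pl.takeWhile pvNE).length : Nat) : Int) else -1) := by
  induction pl with
  | nil => intro k; simp [PySem.Chars.find.go]
  | cons c rest ih =>
    intro k
    by_cases hc : c = '='
    · subst hc
      simp [PySem.Chars.find.go, List.isPrefixOf, pvNE_eq]
    · have hp : List.isPrefixOf ['='] (c :: rest) = false := by
        simp [List.isPrefixOf]; exact fun h => hc h.symm
      rw [PySem.Chars.find.go]
      simp only [hp, Bool.false_eq_true, if_false, ih (k+1), List.takeWhile_cons,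
        pvNE_ne hc, List.mem_cons]
      have : ¬ '=' = c := fun h => hc h.symm
      simp only [this, false_or, if_true, List.length_cons]
      split
      · push_cast; ring
      · rfl

lemma find_eq_tw (pl : List Char) (h : '=' ∈ pl) :
    PySem.Chars.find pl ['='] = ((pl.takeWhile pvNE).length : Int) := by
  rw [PySem.Chars.find, find_go_eq]
  simp [h]

lemma isIn_eq_mem (pl : List Char) : PySem.Chars.isIn ['='] pl = decide ('=' ∈ pl) := by
  by_cases h : '=' ∈ pl
  · simp [h, (PySem.Chars.isIn_iff_infix _ _).2 ((List.singleton_infix_iff '=' pl).2 h)]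
  · simp only [h, decide_false]
    rw [PySem.Chars.isIn_eq_false_iff, List.singleton_infix_iff]
    exact h

lemma tw_dw (pl : List Char) (h : '=' ∈ pl) :
    pl = pl.takeWhile pvNE ++ '=' :: (pl.dropWhile pvNE).tail := by
  induction pl with
  | nil => simp at h
  | cons c rest ih =>
    by_cases hc : c = '='
    · subst hc; simp [pvNE_eq]
    · have hm : '=' ∈ rest := by
        rcases List.mem_cons.1 h with h1 | h1
        · exact absurd h1.symm hc
        · exact h1
      simp only [List.takeWhile_cons, List.dropWhile_cons, pvNE_ne hc, if_true,
        List.cons_append, List.cons.injEq, true_and]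
      exact ih hm

lemma key_eq_iff (pl name : List Char) (h : '=' ∈ pl) (hn : '=' ∉ name) :
    (name ++ ['=']).isPrefixOf pl = (pl.takeWhile pvNE == name) := by
  by_cases hk : pl.takeWhile pvNE = name
  · simp only [hk, beq_self_eq_true]
    rw [List.isPrefixOf_iff_prefix]
    refine ⟨(pl.dropWhile pvNE).tail, ?_⟩
    have hd := tw_dw pl h
    rw [hk] at hd
    rw [List.append_assoc]; simp [← hd]
  · have hb : (pl.takeWhile pvNE == name) = false := by simpa using hk
    rw [hb, Bool.eq_false_iff]
    intro hp
    apply hk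
    rw [List.isPrefixOf_iff_prefix] at hp
    rcases hp with ⟨r, hr⟩
    rw [← hr, List.append_assoc, List.takeWhile_append]
    have h1 : name.takeWhile pvNE = name := by
      rw [List.takeWhile_eq_self_iff]
      intro a ha
      exact pvNE_ne (fun he => hn (he ▸ ha))
    rw [h1]
    simp [pvNE_eq]

-- no '=' ⇒ startswith (name ++ "=") is false
lemma startswith_false (pl name : List Char) (h : '=' ∉ pl) :
    (name ++ ['=']).isPrefixOf pl = false := by
  rw [Bool.eq_false_iff]
  intro hp
  rw [List.isPrefixOf_iff_prefix] at hp
  exact h (hp.mem (by simp))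

lemma splitOnMax_go_zero (l : List Char) (f : Nat) (cur : List Char) (acc : List (List Char)) :
    PySem.Chars.splitOnMax.go ['='] (f+1) 0 l cur acc = ((cur.reverse ++ l) :: acc).reverse := by
  cases l with
  | nil => simp [PySem.Chars.splitOnMax.go]
  | cons c rest => rw [PySem.Chars.splitOnMax.go]; simp

-- splitOnMax characterization (maxsplit = 1, sep = "=")
lemma splitOnMax_go_eq (pl : List Char) : ∀ (fuel : Nat) (cur : List Char) (acc : List (List Char)),
    pl.length < fuel →
    PySem.Chars.splitOnMax.go ['='] fuel 1 pl cur acc =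
      (if '=' ∈ pl
       then ((pl.dropWhile pvNE).tail :: (cur.reverse ++ pl.takeWhile pvNE) :: acc).reverse
       else ((cur.reverse ++ pl) :: acc).reverse) := by
  induction pl with
  | nil =>
    intro fuel cur acc hf
    match fuel, hf with
    | (f+1), _ => simp [PySem.Chars.splitOnMax.go]
  | cons c rest ih =>
    intro fuel cur acc hf
    match fuel, hf with
    | (f+1), hf =>
      by_cases hc : c = '='
      · subst hc
        rw [PySem.Chars.splitOnMax.go]
        have hpre : List.isPrefixOf ['='] ('=' :: rest) = true := by
          simp [List.isPrefixOf]
        simp only [hpre, if_true, List.length_cons] at *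
        have hf' : 0 < f := by omega
        match f, hf' with
        | (f'+1), _ =>
          rw [splitOnMax_go_zero]
          simp [pvNE_eq]
      · have hpre : List.isPrefixOf ['='] (c :: rest) = false := by
          simp [List.isPrefixOf]; exact fun h => hc h.symm
        rw [PySem.Chars.splitOnMax.go]
        simp only [hpre, Bool.false_eq_true, if_false]
        rw [ih f (c :: cur) acc (by simpa using Nat.lt_of_succ_lt_succ hf)]
        have : ¬ '=' = c := fun h => hc h.symm
        simp [pvNE_ne hc, this]

-- per-part split fact
lemma splitMax_eq (p : String) (h : '=' ∈ p.toList) :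
    (PySem.Str.splitMax? p "=" 1).getD [] =
      [String.ofList (p.toList.takeWhile pvNE),
       String.ofList ((p.toList.dropWhile pvNE).tail)] := by
  have h1 : PySem.Str.splitMax? p "=" 1 =
      Option.map (List.map String.ofList) (PySem.Chars.splitMax? p.toList ['='] 1) := rfl
  have h2 : PySem.Chars.splitMax? p.toList ['='] 1 =
      some (PySem.Chars.splitOnMax p.toList ['='] 1) := by
    simp [PySem.Chars.splitMax?]
  have h3 : PySem.Chars.splitOnMax p.toList ['='] 1 =
      PySem.Chars.splitOnMax.go ['='] (p.toList.length + 1) 1 p.toList [] [] := by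
    simp [PySem.Chars.splitOnMax]
  rw [h1, h2, h3, splitOnMax_go_eq p.toList (p.toList.length + 1) [] [] (by omega)]
  simp [h]

lemma drop_cons_len (t r : List Char) (c : Char) : (t ++ c :: r).drop (t.length + 1) = r := by
  induction t with
  | nil => simp
  | cons x xs ih => simp [ih]

lemma drop_succ_tw (pl : List Char) (h : '=' ∈ pl) :
    pl.drop ((pl.takeWhile pvNE).length + 1) = (pl.dropWhile pvNE).tail := by
  calc pl.drop ((pl.takeWhile pvNE).length + 1)
      = (pl.takeWhile pvNE ++ '=' :: (pl.dropWhile pvNE).tail).drop ((pl.takeWhile pvNE).length + 1) := by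
        rw [← tw_dw pl h]
    _ = (pl.dropWhile pvNE).tail := drop_cons_len _ _ _

lemma take_tw (pl : List Char) :
    pl.take (pl.takeWhile pvNE).length = pl.takeWhile pvNE := by
  have := List.takeWhile_prefix (l := pl) (p := pvNE)
  exact (List.prefix_iff_eq_take.1 this).symm

-- the two loop bodies, named for the invariant proof
def stepA (out : PySem.Dict String (Option String)) (p : String) : PySem.Dict String (Option String) :=
  let out := if PySem.Str.startswith p "AccountName=" then
      out.insert "AccountName" (PySem.List.pyGet? ((PySem.Str.splitMax? p "=" 1).getD []) 1)
    else out
  if PySem.Str.startswith p "AccountKey=" then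
    out.insert "AccountKey" (PySem.List.pyGet? ((PySem.Str.splitMax? p "=" 1).getD []) 1)
  else out

def stepB (d : PySem.Dict String String) (p : String) : PySem.Dict String String :=
  if PySem.Str.isIn "=" p then
    d.insert (PySem.Str.slice p none (some (PySem.Str.find p "=")))
      (PySem.Str.slice p (some (PySem.Str.find p "=" + 1)) none)
  else d

lemma loop_eq (parts : List String) : ∀ (a k : Option String) (d : PySem.Dict String String),
    a = d.get? "AccountName" → k = d.get? "AccountKey" →
    (parts.foldl stepA (PySem.Dict.mk [("AccountName", a), ("AccountKey", k)])).items
      = [("AccountName", (parts.foldl stepB d).get? "AccountName"),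
         ("AccountKey", (parts.foldl stepB d).get? "AccountKey")] := by
  induction parts with
  | nil => intro a k d ha hk; simp [ha, hk]
  | cons p rest ih =>
    intro a k d ha hk
    simp only [List.foldl_cons]
    by_cases hm : '=' ∈ p.toList
    · -- '=' present: both loops consult the first '='
      have hswN : PySem.Str.startswith p "AccountName=" = (p.toList.takeWhile pvNE == "AccountName".toList) := by
        rw [PySem.Str.startswith_eq]
        show List.isPrefixOf ("AccountName".toList ++ ['=']) p.toList = _
        exact key_eq_iff p.toList "AccountName".toList hm (by decide)
      have hswK : PySem.Str.startswith p "AccountKey=" = (p.toList.takeWhile pvNE == "AccountKey".toList) := by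
        rw [PySem.Str.startswith_eq]
        show List.isPrefixOf ("AccountKey".toList ++ ['=']) p.toList = _
        exact key_eq_iff p.toList "AccountKey".toList hm (by decide)
      have hin : PySem.Str.isIn "=" p = true := by
        rw [PySem.Str.isIn_eq]
        show PySem.Chars.isIn ['='] p.toList = true
        simp [isIn_eq_mem, hm]
      have hfind : PySem.Str.find p "=" = ((p.toList.takeWhile pvNE).length : Int) := by
        rw [PySem.Str.find_eq]
        show PySem.Chars.find p.toList ['='] = _
        exact find_eq_tw p.toList hm
      have hkey : PySem.Str.slice p none (some (PySem.Str.find p "=")) =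
          String.ofList (p.toList.takeWhile pvNE) := by
        rw [hfind]
        show String.ofList (PySem.Chars.slice p.toList none (some _)) = _
        simp [PySem.Chars.slice_eq_listSlice, take_tw]
      have hval : PySem.Str.slice p (some (PySem.Str.find p "=" + 1)) none =
          String.ofList ((p.toList.dropWhile pvNE).tail) := by
        rw [hfind]
        show String.ofList (PySem.Chars.slice p.toList (some _) none) = _
        rw [PySem.Chars.slice_eq_listSlice, PySem.List.slice_from _ (by positivity)]
        rw [show ((((p.toList.takeWhile pvNE).length : Int) + 1).toNat) = (p.toList.takeWhile pvNE).length + 1 by omega]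
        rw [drop_succ_tw p.toList hm]
      have hgetA : PySem.List.pyGet? ((PySem.Str.splitMax? p "=" 1).getD []) 1 =
          some (String.ofList ((p.toList.dropWhile pvNE).tail)) := by
        rw [splitMax_eq p hm]; rfl
      have hB : stepB d p = d.insert (String.ofList (p.toList.takeWhile pvNE))
          (String.ofList ((p.toList.dropWhile pvNE).tail)) := by
        unfold stepB
        rw [hin, hkey, hval]
        simp
      by_cases hN : p.toList.takeWhile pvNE = "AccountName".toList
      · have hkeyN : String.ofList (p.toList.takeWhile pvNE) = "AccountName" := by
          rw [hN]; rfl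
        have hbN : (p.toList.takeWhile pvNE == "AccountName".toList) = true := by simp [hN]
        have hbK : (p.toList.takeWhile pvNE == "AccountKey".toList) = false := by
          simp only [beq_eq_false_iff_ne, ne_eq, hN]; decide
        have hA : stepA (PySem.Dict.mk [("AccountName", a), ("AccountKey", k)]) p =
            PySem.Dict.mk [("AccountName", some (String.ofList ((p.toList.dropWhile pvNE).tail))), ("AccountKey", k)] := by
          unfold stepA
          rw [hswN, hswK, hbN, hbK]
          simp [hgetA, PySem.Dict.insert, PySem.Dict.contains]
        rw [hA, hB]
        exact ih _ _ _ (by rw [hkeyN, PySem.Dict.get?_insert_self])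
          (by rw [hkeyN, PySem.Dict.get?_insert_of_ne _ _ (by decide), hk])
      · by_cases hK : p.toList.takeWhile pvNE = "AccountKey".toList
        · have hkeyK : String.ofList (p.toList.takeWhile pvNE) = "AccountKey" := by
            rw [hK]; rfl
          have hbN : (p.toList.takeWhile pvNE == "AccountName".toList) = false := by
            simp only [beq_eq_false_iff_ne, ne_eq, hK]; decide
          have hbK : (p.toList.takeWhile pvNE == "AccountKey".toList) = true := by simp [hK]
          have hA : stepA (PySem.Dict.mk [("AccountName", a), ("AccountKey", k)]) p =
              PySem.Dict.mk [("AccountName", a), ("AccountKey", some (String.ofList ((p.toList.dropWhile pvNE).tail)))] := by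
            unfold stepA
            rw [hswN, hswK, hbN, hbK]
            simp [hgetA, PySem.Dict.insert, PySem.Dict.contains]
          rw [hA, hB]
          exact ih _ _ _ (by rw [hkeyK, PySem.Dict.get?_insert_of_ne _ _ (by decide), ha])
            (by rw [hkeyK, PySem.Dict.get?_insert_self])
        · have hkne : String.ofList (p.toList.takeWhile pvNE) ≠ "AccountName" := by
            intro he; apply hN; rw [← @String.toList_ofList (p.toList.takeWhile pvNE), he]
          have hkne2 : String.ofList (p.toList.takeWhile pvNE) ≠ "AccountKey" := by
            intro he; apply hK; rw [← @String.toList_ofList (p.toList.takeWhile pvNE), he]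
          have hbN : (p.toList.takeWhile pvNE == "AccountName".toList) = false := by
            simp only [beq_eq_false_iff_ne, ne_eq]; exact hN
          have hbK : (p.toList.takeWhile pvNE == "AccountKey".toList) = false := by
            simp only [beq_eq_false_iff_ne, ne_eq]; exact hK
          have hA : stepA (PySem.Dict.mk [("AccountName", a), ("AccountKey", k)]) p =
              PySem.Dict.mk [("AccountName", a), ("AccountKey", k)] := by
            unfold stepA
            rw [hswN, hswK, hbN, hbK]
            simp
          rw [hA, hB]
          exact ih _ _ _ (by rw [PySem.Dict.get?_insert_of_ne _ _ (Ne.symm hkne), ha])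
            (by rw [PySem.Dict.get?_insert_of_ne _ _ (Ne.symm hkne2), hk])
    · -- no '=': both loops skip the part
      have hswN : PySem.Str.startswith p "AccountName=" = false := by
        rw [PySem.Str.startswith_eq]
        show List.isPrefixOf ("AccountName".toList ++ ['=']) p.toList = false
        exact startswith_false p.toList _ hm
      have hswK : PySem.Str.startswith p "AccountKey=" = false := by
        rw [PySem.Str.startswith_eq]
        show List.isPrefixOf ("AccountKey".toList ++ ['=']) p.toList = false
        exact startswith_false p.toList _ hm
      have hin : PySem.Str.isIn "=" p = false := by
        rw [PySem.Str.isIn_eq]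
        show PySem.Chars.isIn ['='] p.toList = false
        simp [isIn_eq_mem, hm]
      have hA : stepA (PySem.Dict.mk [("AccountName", a), ("AccountKey", k)]) p =
          PySem.Dict.mk [("AccountName", a), ("AccountKey", k)] := by
        unfold stepA
        rw [hswN, hswK]
        simp
      have hB : stepB d p = d := by unfold stepB; rw [hin]; simp
      rw [hA, hB]
      exact ih a k d ha hk


-- ===== VERDICT (by name: the statement is the Claim_ definition above) =====
theorem parse_account_from_conn_str_py_spec : Claim_equal_parse_account_from_conn_str_py := by
  intro conn_str _
  unfold Spec_parse_account_from_conn_str_py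
  show (((PySem.Str.split? conn_str ";").getD []).foldl stepA
      (PySem.Dict.ofList [("AccountName", none), ("AccountKey", none)])).items = _
  exact loop_eq _ none none PySem.Dict.empty rfl rfl
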